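-- pv_equiv track=rewrite | github.com/Mikeeyh/softuni_advanced_exercices | exams/list_pureness.py | best_pureness
-- ===== SOURCE A (Python) =====
-- def best_pureness(numbers, K):
--     best_pur = 0
--     best_rotation = 0
--
--     for rotation in range(K):
--         current_pureness = sum(i * num for i, num in enumerate(numbers))
--         if current_pureness > best_pur:
--             best_pur = current_pureness
--             best_rotation = rotation
--
--         numbers = [numbers[-1]] + numbers[:-1]  # Rotate the list one position to the right
--
--     return f"Best pureness {best_pur} after {best_rotation} rotations"
-- ===== SOURCE B (Python) =====
-- def best_pureness(numbers, K):
--     # Incremental: rotating right changes the weighted sum by total - n * last,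
--     # so each rotation is O(1) after an O(n) setup (A recomputes the sum each rotation).
--     n = len(numbers)
--     best_pur = 0
--     best_rotation = 0
--     if n == 0:
--         return f"Best pureness {best_pur} after {best_rotation} rotations"
--     total = sum(numbers)
--     cur = sum(i * x for i, x in enumerate(numbers))
--     idx = n - 1  # index (in the original list) of the current list's last element
--     for r in range(K):
--         if cur > best_pur:
--             best_pur = cur
--             best_rotation = r
--         cur += total - n * numbers[idx]
--         idx = idx - 1 if idx > 0 else n - 1
--     return f"Best pureness {best_pur} after {best_rotation} rotations"
-- ===== Notes on version B (the rewrite author's own statement) =====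
-- stated objective: faster
-- what changed: B replaces A's per-rotation O(n) recomputation of the weighted-index sum (and the per-rotation list rebuild) by an O(1) incremental update new = old + total - n*last, tracking the rotated list's last element by an index into the original list.
import Mathlib
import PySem

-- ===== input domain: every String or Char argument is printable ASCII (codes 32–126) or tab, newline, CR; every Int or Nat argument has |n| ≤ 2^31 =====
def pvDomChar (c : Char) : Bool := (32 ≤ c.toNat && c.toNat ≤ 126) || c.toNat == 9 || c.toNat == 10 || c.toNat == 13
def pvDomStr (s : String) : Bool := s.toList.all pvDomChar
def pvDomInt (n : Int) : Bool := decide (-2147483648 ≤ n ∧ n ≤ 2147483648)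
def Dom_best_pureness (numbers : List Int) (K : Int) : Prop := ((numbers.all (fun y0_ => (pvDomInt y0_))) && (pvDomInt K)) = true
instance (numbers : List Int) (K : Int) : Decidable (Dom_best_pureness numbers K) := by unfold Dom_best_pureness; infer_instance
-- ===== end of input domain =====

-- B replaces A's per-rotation O(n) recomputation of the weighted sum by an O(1) incremental
-- update (new = old + total - n*last), measured asymptotically faster (O(n+K) vs O(n*K)).

-- ===== PORT A =====
-- f"Best pureness {bp} after {br} rotations" (same f-string in both Pythons)
def pvFmt (bp br : Int) : String :=
  "Best pureness " ++ PySem.Int.toStr bp ++ " after " ++ PySem.Int.toStr br ++ " rotations"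

-- sum(i * num for i, num in enumerate(numbers)) (this comprehension appears in both Pythons)
def pvPure (nums : List Int) : Int :=
  (PySem.List.enumerate nums 0).foldl (fun acc p => acc + p.1 * p.2) 0

-- one iteration of A's loop; none = the IndexError of numbers[-1] on an empty list
def pvStepA (st : Int × Int × List Int) (r : Int) : Option (Int × Int × List Int) :=
  let cur := pvPure st.2.2
  let bp := if cur > st.1 then cur else st.1
  let br := if cur > st.1 then r else st.2.1
  match PySem.List.pyGet? st.2.2 (-1) with
  | none => none
  | some last => some (bp, br, last :: PySem.List.slice st.2.2 none (some (-1)))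

def pvLoopA : List Int → (Int × Int × List Int) → Option (Int × Int × List Int)
  | [], st => some st
  | r :: rs, st =>
    match pvStepA st r with
    | none => none
    | some st' => pvLoopA rs st'

def best_pureness (numbers : List Int) (K : Int) : String :=
  match pvLoopA (PySem.List.pyRange 0 K 1) (0, 0, numbers) with
  | none => ""   -- unreachable inside Pre_: A raises IndexError here
  | some st => pvFmt st.1 st.2.1

-- ===== PORT B =====
-- one iteration of B's loop; state (best_pur, best_rotation, cur, idx); idx is always
-- a valid index here, so pyGetD's default is never consulted
def pvStepB (n total : Int) (numbers : List Int) (st : Int × Int × Int × Int) (r : Int) :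
    Int × Int × Int × Int :=
  let cur := st.2.2.1
  let idx := st.2.2.2
  let bp := if cur > st.1 then cur else st.1
  let br := if cur > st.1 then r else st.2.1
  let cur' := cur + total - n * PySem.List.pyGetD numbers idx 0
  let idx' := if idx > 0 then idx - 1 else n - 1
  (bp, br, cur', idx')

def best_pureness_alt (numbers : List Int) (K : Int) : String :=
  let n : Int := numbers.length
  if n == 0 then pvFmt 0 0
  else
    let total := numbers.sum
    let cur := pvPure numbers
    let st := (PySem.List.pyRange 0 K 1).foldl (pvStepB n total numbers) (0, 0, cur, n - 1)
    pvFmt st.1 st.2.1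

-- ===== PRECONDITION & SPEC =====
-- Pre_ excludes exactly the inputs (numbers = [] with K ≥ 1) on which A raises IndexError
-- at numbers[-1]; it excludes nothing on which A returns.
def Pre_best_pureness (numbers : List Int) (K : Int) : Prop := numbers ≠ [] ∨ K ≤ 0
instance (numbers : List Int) (K : Int) : Decidable (Pre_best_pureness numbers K) := by
  unfold Pre_best_pureness; infer_instance

def pvWitness_best_pureness : List Int × Int := ([3, -1, 2], 4)

def Spec_best_pureness (numbers : List Int) (K : Int) (out : String) : Prop :=
  out = best_pureness_alt numbers K
instance (numbers : List Int) (K : Int) (out : String) : Decidable (Spec_best_pureness numbers K out) := by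
  unfold Spec_best_pureness; infer_instance

-- ===== CLAIM (what is proved, stated in full; the proofs are below) =====
def Claim_equal_best_pureness : Prop := ∀ (numbers : List Int) (K : Int),
  Dom_best_pureness numbers K → Pre_best_pureness numbers K →
  Spec_best_pureness numbers K (best_pureness numbers K)

-- ===== LEMMAS AND PROOFS =====

-- mathematical form of the weighted-index sum: Q [] = 0, Q (x::t) = Q t + sum t
def pvQ : List Int → Int
  | [] => 0
  | _ :: t => pvQ t + t.sum

lemma pvPure_enum (t : List Int) : ∀ (s a : Int),
    (PySem.List.enumerate t s).foldl (fun acc p => acc + p.1 * p.2) a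
      = a + s * t.sum + pvQ t := by
  induction t with
  | nil => intro s a; simp [PySem.List.enumerate_nil, pvQ]
  | cons x t ih =>
    intro s a
    rw [PySem.List.enumerate_cons]
    simp only [List.foldl_cons, ih (s + 1) (a + s * x), pvQ, List.sum_cons]
    ring

lemma pvPure_eq_pvQ (t : List Int) : pvPure t = pvQ t := by
  simp [pvPure, pvPure_enum t 0 0]

lemma pvQ_concat (b : List Int) (x : Int) :
    pvQ (b ++ [x]) = pvQ b + (b.length : Int) * x := by
  induction b with
  | nil => simp [pvQ]
  | cons y b ih =>
    simp only [List.cons_append, pvQ, ih, List.sum_append, List.sum_cons, List.sum_nil,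
      List.length_cons]
    push_cast
    ring

lemma pvQ_rot (b : List Int) (x : Int) :
    pvQ (x :: b) = pvQ (b ++ [x]) + (b ++ [x]).sum - ((b ++ [x]).length : Int) * x := by
  simp only [pvQ, pvQ_concat, List.sum_append, List.sum_cons, List.sum_nil, List.length_append,
    List.length_cons, List.length_nil]
  push_cast
  ring

lemma pv_sum_rotview (numbers : List Int) (j : Nat) :
    (numbers.drop j ++ numbers.take j).sum = numbers.sum := by
  have h := List.take_append_drop j numbers
  calc (numbers.drop j ++ numbers.take j).sum
      = (numbers.drop j).sum + (numbers.take j).sum := by rw [List.sum_append]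
    _ = (numbers.take j ++ numbers.drop j).sum := by rw [List.sum_append]; ring
    _ = numbers.sum := by rw [h]

lemma pv_len_rotview (numbers : List Int) (j : Nat) (h : j ≤ numbers.length) :
    (numbers.drop j ++ numbers.take j).length = numbers.length := by
  simp [List.length_append, List.length_drop, List.length_take]
  omega

-- the coupled loop invariant: A carries the rotated list, B carries its weighted sum (cur)
-- and the original-list index (idx) of its last element
lemma pvLoop_eq (numbers : List Int) (rs : List Int) : ∀ (j : Nat) (bp br cur idx : Int),
    1 ≤ j → j ≤ numbers.length →
    cur = pvQ (numbers.drop j ++ numbers.take j) → idx = (j : Int) - 1 →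
    (pvLoopA rs (bp, br, numbers.drop j ++ numbers.take j)).map (fun st => (st.1, st.2.1))
      = some (((rs.foldl (pvStepB (numbers.length : Int) numbers.sum numbers) (bp, br, cur, idx)).1,
               (rs.foldl (pvStepB (numbers.length : Int) numbers.sum numbers) (bp, br, cur, idx)).2.1)) := by
  induction rs with
  | nil => intro j bp br cur idx h1 h2 hc hi; simp [pvLoopA]
  | cons r rs ih =>
    intro j bp br cur idx h1 h2 hc hi
    obtain ⟨m, rfl⟩ : ∃ m, j = m + 1 := ⟨j - 1, by omega⟩
    have hm : m < numbers.length := by omega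
    have htake : numbers.take (m + 1) = numbers.take m ++ [numbers[m]] := by
      rw [List.take_add_one, List.getElem?_eq_getElem hm]; rfl
    have hdrop : numbers.drop m = numbers[m] :: numbers.drop (m + 1) :=
      (List.getElem_cons_drop hm).symm
    have hview : numbers.drop (m + 1) ++ numbers.take (m + 1)
        = (numbers.drop (m + 1) ++ numbers.take m) ++ [numbers[m]] := by
      rw [htake, List.append_assoc]
    have hlast : PySem.List.pyGet? (numbers.drop (m + 1) ++ numbers.take (m + 1)) (-1)
        = some numbers[m] := by
      rw [hview, PySem.List.pyGet?_neg_one, List.getLast?_concat]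
    have hdl : PySem.List.slice (numbers.drop (m + 1) ++ numbers.take (m + 1)) none (some (-1))
        = numbers.drop (m + 1) ++ numbers.take m := by
      rw [hview, PySem.List.slice_to_neg_one, List.dropLast_concat]
    have hidxget : PySem.List.pyGetD numbers idx 0 = numbers[m] := by
      have hidx : idx = ((m : Nat) : Int) := by omega
      rw [hidx, PySem.List.pyGetD_natCast, List.getD_eq_getElem?_getD,
        List.getElem?_eq_getElem hm]
      rfl
    have hstep : pvStepB (numbers.length : Int) numbers.sum numbers (bp, br, cur, idx) r
        = (if cur > bp then cur else bp, if cur > bp then r else br,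
           cur + numbers.sum - (numbers.length : Int) * numbers[m],
           if idx > 0 then idx - 1 else (numbers.length : Int) - 1) := by
      simp only [pvStepB, hidxget]
    have hrot : numbers[m] :: (numbers.drop (m + 1) ++ numbers.take m)
        = numbers.drop m ++ numbers.take m := by
      rw [hdrop, List.cons_append]
    have hcur' : cur + numbers.sum - (numbers.length : Int) * numbers[m]
        = pvQ (numbers.drop m ++ numbers.take m) := by
      rw [← hrot, hc, hview, pvQ_rot (numbers.drop (m + 1) ++ numbers.take m) numbers[m],
        ← hview, pv_sum_rotview numbers (m + 1), pv_len_rotview numbers (m + 1) h2]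
    simp only [pvLoopA, pvStepA, pvPure_eq_pvQ, hlast, hdl, List.foldl_cons, hstep, ← hc, hrot]
    by_cases hm0 : 1 ≤ m
    · rw [if_pos (show idx > 0 by omega)]
      exact ih m _ _ _ _ hm0 (by omega) hcur' (by omega)
    · have hm0' : m = 0 := by omega
      rw [if_neg (show ¬ idx > 0 by omega)]
      have hids : numbers.drop m ++ numbers.take m
          = numbers.drop numbers.length ++ numbers.take numbers.length := by
        subst hm0'; simp
      rw [hids]
      exact ih numbers.length _ _ _ _ (by omega) le_rfl (hcur'.trans (by rw [hids])) rfl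

-- ===== VERDICT (by name: the statement is the Claim_ definition above) =====
theorem best_pureness_spec : Claim_equal_best_pureness := by
  unfold Claim_equal_best_pureness
  intro numbers K _ hpre
  unfold Spec_best_pureness
  cases numbers with
  | nil =>
    have hK : K ≤ 0 := by
      rcases hpre with h | h
      · exact absurd rfl h
      · exact h
    rw [best_pureness, best_pureness_alt]
    rw [PySem.List.pyRange_one_eq_nil hK]
    simp [pvLoopA]
  | cons x t =>
    have hlen1 : 1 ≤ (x :: t).length := by simp
    have h := pvLoop_eq (x :: t) (PySem.List.pyRange 0 K 1) (x :: t).length 0 0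
      (pvQ (x :: t)) (((x :: t).length : Int) - 1) hlen1 le_rfl (by simp) rfl
    simp only [List.drop_length, List.take_length, List.nil_append] at h
    have hne : ((((x :: t).length : Nat) : Int) == 0) = false := by
      simp only [beq_eq_false_iff_ne, ne_eq]
      omega
    simp only [best_pureness, best_pureness_alt, pvPure_eq_pvQ, hne, Bool.false_eq_true,
      if_false]
    cases hL : pvLoopA (PySem.List.pyRange 0 K 1) (0, 0, x :: t) with
    | none => rw [hL] at h; simp at h
    | some st =>
      rw [hL] at h
      simp only [Option.map_some, Option.some_inj, Prod.mk.injEq] at h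
      show pvFmt st.1 st.2.1 = _
      rw [h.1, h.2]
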